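-- pv_equiv track=rewrite | github.com/NotSquiz/ATLAS | atlas/nutrition/food_parser.py | _split_foods
-- ===== SOURCE A (Python) =====
-- def _split_foods(text: str) -> list[str]:
--     """Split input into individual food items."""
--     # Split on common separators
--     separators = [",", " and ", " with ", " plus ", ";"]
--     items = [text]
--
--     for sep in separators:
--         new_items = []
--         for item in items:
--             new_items.extend(item.split(sep))
--         items = new_items
--
--     return [item.strip() for item in items if item.strip()]
-- ===== SOURCE B (Python) =====
-- def _split_foods(text: str) -> list[str]:
--     """Split input into individual food items."""
--     separators = [",", " and ", " with ", " plus ", ";"]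
--
--     def fragments(piece, seps):
--         if not seps:
--             yield piece
--             return
--         for part in piece.split(seps[0]):
--             yield from fragments(part, seps[1:])
--
--     return [f.strip() for f in fragments(text, separators) if f.strip()]
-- ===== Notes on version B (the rewrite author's own statement) =====
-- stated objective: simpler
-- what changed: A repeatedly rebuilds the whole item list once per separator (five breadth-first passes with an accumulator list); B is a single depth-first recursion over the separator list that yields each fully split fragment directly, followed by the same strip-and-filter.
import Mathlib
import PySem

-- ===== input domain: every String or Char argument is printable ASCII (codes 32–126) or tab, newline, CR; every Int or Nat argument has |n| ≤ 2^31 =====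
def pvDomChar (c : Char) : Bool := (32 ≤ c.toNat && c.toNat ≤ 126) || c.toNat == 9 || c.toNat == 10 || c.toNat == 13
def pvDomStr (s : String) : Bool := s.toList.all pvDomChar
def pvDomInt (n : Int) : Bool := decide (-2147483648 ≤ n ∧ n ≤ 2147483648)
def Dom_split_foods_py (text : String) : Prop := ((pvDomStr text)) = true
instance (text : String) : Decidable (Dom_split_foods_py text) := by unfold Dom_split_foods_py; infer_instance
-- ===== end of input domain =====

-- B replaces A's level-by-level rebuild of the item list (one full pass per separator)
-- by a single depth-first recursion over the separator list (objective: simpler).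

-- s.split(sep): exact via PySem.Str.split? (none only for sep = "", which never occurs here)
def pySplit (s sep : String) : List String := (PySem.Str.split? s sep).getD []

-- ===== PORT A =====
def split_foods_py (text : String) : List String :=
  let separators : List String := [",", " and ", " with ", " plus ", ";"]
  let items : List String := [text]
  let items := separators.foldl (fun items sep =>
      items.foldl (fun new_items item => new_items ++ pySplit item sep) []) items
  (items.filter (fun item => PySem.Str.strip item != "")).map PySem.Str.strip

-- ===== PORT B =====
def pvFragments : String → List String → List String
  | piece, [] => [piece]
  | piece, sep :: rest => (pySplit piece sep).flatMap (fun part => pvFragments part rest)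

def split_foods_py_alt (text : String) : List String :=
  let separators : List String := [",", " and ", " with ", " plus ", ";"]
  ((pvFragments text separators).filter (fun f => PySem.Str.strip f != "")).map PySem.Str.strip

-- ===== PRECONDITION & SPEC =====
def Spec_split_foods_py (text : String) (out : List String) : Prop := out = split_foods_py_alt text
instance (text : String) (out : List String) : Decidable (Spec_split_foods_py text out) := by unfold Spec_split_foods_py; infer_instance

-- ===== CLAIM (what is proved, stated in full; the proofs are below) =====
def Claim_equal_split_foods_py : Prop := ∀ (text : String), Dom_split_foods_py text → Spec_split_foods_py text (split_foods_py text)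

-- ===== LEMMAS AND PROOFS =====

-- A's breadth-first pass-per-separator loop equals B's depth-first recursion.
theorem pvFoldl_eq_fragments (seps : List String) : ∀ (items : List String),
    seps.foldl (fun items sep =>
      items.foldl (fun new_items item => new_items ++ pySplit item sep) []) items
    = items.flatMap (fun p => pvFragments p seps) := by
  induction seps with
  | nil => intro items; simp [pvFragments]
  | cons sep rest ih =>
    intro items
    simp only [List.foldl_cons]
    rw [PySem.List.foldl_append_eq_flatMap, ih, List.nil_append, List.flatMap_assoc]
    rfl

-- ===== VERDICT (by name: the statement is the Claim_ definition above) =====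
theorem split_foods_py_spec : Claim_equal_split_foods_py := by
  intro text _
  simp only [Spec_split_foods_py, split_foods_py, split_foods_py_alt, pvFoldl_eq_fragments]
  simp
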